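-- pv_equiv track=rewrite | github.com/statist32/advent_of_code | day11.py | get_adjacent_seats
-- ===== SOURCE A (Python) =====
-- def add_tuple(t1, t2):
--     return (t1[0]+t2[0], t1[1]+t2[1])
--
-- def get_adjacent_seats(row, column, max_row, max_column):
--     adjacent_offset = [(-1, -1), (-1, 0), (-1, 1),
--                        (0, -1),           (0, 1),
--                        (1, -1),  (1, 0),  (1, 1)]
--     adjacent_seats = []
--     for adja in adjacent_offset:
--         next_row, next_column = add_tuple(adja, (row, column))
--         if -1 < next_row < max_row and -1 < next_column < max_column:
--             adjacent_seats.append((next_row, next_column))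
--     return adjacent_seats
-- ===== SOURCE B (Python) =====
-- def get_adjacent_seats(row, column, max_row, max_column):
--     adjacent_seats = []
--     for r in range(max(0, row - 1), min(max_row, row + 2)):
--         for c in range(max(0, column - 1), min(max_column, column + 2)):
--             if (r, c) != (row, column):
--                 adjacent_seats.append((r, c))
--     return adjacent_seats
-- ===== Notes on version B (the rewrite author's own statement) =====
-- stated objective: simpler
-- what changed: Replaces the 8-offset table plus per-cell bounds test with two clamped ranges (max(0,x-1)..min(bound,x+2)) enumerated as a Cartesian product that skips the center, so no offset list and no bounds check per cell.
import Mathlib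
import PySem

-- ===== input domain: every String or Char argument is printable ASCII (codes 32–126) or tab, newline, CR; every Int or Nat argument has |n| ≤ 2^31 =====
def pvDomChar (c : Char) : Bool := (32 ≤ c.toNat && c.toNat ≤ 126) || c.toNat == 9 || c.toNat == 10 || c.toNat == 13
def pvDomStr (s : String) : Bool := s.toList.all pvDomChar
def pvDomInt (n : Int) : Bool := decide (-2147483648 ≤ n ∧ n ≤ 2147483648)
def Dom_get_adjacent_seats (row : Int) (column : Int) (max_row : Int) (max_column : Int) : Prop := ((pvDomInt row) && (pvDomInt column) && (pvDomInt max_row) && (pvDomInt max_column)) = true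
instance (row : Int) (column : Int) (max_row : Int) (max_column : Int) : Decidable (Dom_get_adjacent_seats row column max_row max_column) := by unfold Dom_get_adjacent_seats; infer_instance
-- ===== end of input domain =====

-- B replaces A's 8-offset table plus per-cell bounds test with two clamped ranges enumerated
-- as a Cartesian product that skips the center; the return value is proved identical on all inputs.

-- ===== PORT A =====
def pvAddTuple (t1 t2 : Int × Int) : Int × Int := (t1.1 + t2.1, t1.2 + t2.2)

def get_adjacent_seats (row : Int) (column : Int) (max_row : Int) (max_column : Int) : List (Int × Int) :=
  [((-1 : Int), (-1 : Int)), (-1, 0), (-1, 1), (0, -1), (0, 1), (1, -1), (1, 0), (1, 1)].foldl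
    (fun adjacent_seats adja =>
      let nrc := pvAddTuple adja (row, column)
      if -1 < nrc.1 ∧ nrc.1 < max_row ∧ -1 < nrc.2 ∧ nrc.2 < max_column
      then adjacent_seats ++ [(nrc.1, nrc.2)]
      else adjacent_seats) []

-- ===== PORT B =====
def get_adjacent_seats_alt (row : Int) (column : Int) (max_row : Int) (max_column : Int) : List (Int × Int) :=
  (PySem.List.pyRange (max 0 (row - 1)) (min max_row (row + 2)) 1).foldl
    (fun acc r =>
      (PySem.List.pyRange (max 0 (column - 1)) (min max_column (column + 2)) 1).foldl
        (fun acc2 c => if (r, c) ≠ (row, column) then acc2 ++ [(r, c)] else acc2) acc)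
    []

-- ===== PRECONDITION & SPEC =====
def Spec_get_adjacent_seats (row : Int) (column : Int) (max_row : Int) (max_column : Int) (out : List (Int × Int)) : Prop := out = get_adjacent_seats_alt row column max_row max_column
instance (row : Int) (column : Int) (max_row : Int) (max_column : Int) (out : List (Int × Int)) : Decidable (Spec_get_adjacent_seats row column max_row max_column out) := by unfold Spec_get_adjacent_seats; infer_instance

-- ===== CLAIM (what is proved, stated in full; the proofs are below) =====
def Claim_equal_get_adjacent_seats : Prop := ∀ (row : Int) (column : Int) (max_row : Int) (max_column : Int), Dom_get_adjacent_seats row column max_row max_column → Spec_get_adjacent_seats row column max_row max_column (get_adjacent_seats row column max_row max_column)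

-- ===== LEMMAS AND PROOFS =====
lemma pv_filter_pyRange_one (a b lo hi : Int) :
    (PySem.List.pyRange a b 1).filter (fun x => decide (lo ≤ x ∧ x < hi))
      = PySem.List.pyRange (max lo a) (min hi b) 1 := by
  have hperm : List.Perm ((PySem.List.pyRange a b 1).filter (fun x => decide (lo ≤ x ∧ x < hi)))
      (PySem.List.pyRange (max lo a) (min hi b) 1) := by
    rw [List.perm_ext_iff_of_nodup ((PySem.List.nodup_pyRange_one a b).filter _)
        (PySem.List.nodup_pyRange_one _ _)]
    intro x
    simp only [List.mem_filter, PySem.List.mem_pyRange_one, decide_eq_true_eq]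
    omega
  exact List.Perm.eq_of_pairwise (fun x y _ _ h1 h2 => by omega)
    ((PySem.List.pairwise_lt_pyRange_one a b).filter _)
    (PySem.List.pairwise_lt_pyRange_one _ _) hperm

lemma pv_range3 (a : Int) : PySem.List.pyRange (a - 1) (a + 2) 1 = [a - 1, a, a + 1] := by
  rw [PySem.List.pyRange_one_cons (by omega), PySem.List.pyRange_one_cons (by omega),
      PySem.List.pyRange_one_cons (by omega), PySem.List.pyRange_one_eq_nil (by omega)]
  norm_num

lemma pv_clamp3 (a m : Int) :
    PySem.List.pyRange (max 0 (a - 1)) (min m (a + 2)) 1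
      = [a - 1, a, a + 1].filter (fun x => decide (0 ≤ x ∧ x < m)) := by
  rw [← pv_range3 a, pv_filter_pyRange_one]

lemma pv_flatMap_filter {α β : Type} (p : α → Bool) (g : α → List β) (l : List α) :
    (l.filter p).flatMap g = l.flatMap (fun x => if p x then g x else []) := by
  induction l with
  | nil => rfl
  | cons x xs ih =>
    by_cases h : p x <;> simp [h, List.flatMap_cons, ih]

-- row block: filter over one row of pairs
lemma pv_row_block (m n r : Int) (cs : List Int) :
    (cs.map (fun c => (r, c))).filter
        (fun q => decide (0 ≤ q.1 ∧ q.1 < m ∧ 0 ≤ q.2 ∧ q.2 < n))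
      = if 0 ≤ r ∧ r < m then (cs.filter (fun c => decide (0 ≤ c ∧ c < n))).map (fun c => (r, c))
        else [] := by
  induction cs with
  | nil => simp
  | cons c cs ih =>
    simp only [List.map_cons, List.filter_cons, ih]
    split_ifs <;> simp_all

lemma pv_center_filter_ne (row column r : Int) (cs : List Int) (h : r ≠ row) :
    cs.filter (fun c => decide ((r, c) ≠ (row, column))) = cs := by
  apply List.filter_eq_self.mpr
  intro c _
  simp [Prod.ext_iff]
  exact Or.inl h

lemma pv_center_filter_eq (row column n : Int) :
    (([column - 1, column, column + 1].filter (fun c => decide (0 ≤ c ∧ c < n))).filter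
        (fun c => decide ((row, c) ≠ (row, column))))
      = [column - 1, column + 1].filter (fun c => decide (0 ≤ c ∧ c < n)) := by
  have hpred : (fun c : Int => decide ((row, c) ≠ (row, column))) = fun c => decide (c ≠ column) := by
    funext c
    simp [Prod.ext_iff]
  rw [hpred, List.filter_comm]
  have h1 : (column : Int) - 1 ≠ column := by omega
  have h2 : (column : Int) + 1 ≠ column := by omega
  simp [List.filter_cons, h1, h2]

lemma pv_A_filter (m n row col : Int) (l : List (Int × Int)) :
    List.map (fun adja : Int × Int => (adja.1 + row, adja.2 + col))
      (List.filter (fun adja : Int × Int =>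
        decide (0 ≤ adja.1 + row ∧ adja.1 + row < m ∧ 0 ≤ adja.2 + col ∧ adja.2 + col < n)) l)
      = List.filter (fun q : Int × Int => decide (0 ≤ q.1 ∧ q.1 < m ∧ 0 ≤ q.2 ∧ q.2 < n))
          (List.map (fun adja : Int × Int => (adja.1 + row, adja.2 + col)) l) := by
  induction l with
  | nil => rfl
  | cons a l ih =>
    simp only [List.map_cons, List.filter_cons]
    by_cases h : 0 ≤ a.1 + row ∧ a.1 + row < m ∧ 0 ≤ a.2 + col ∧ a.2 + col < n
    · rw [if_pos (by simpa using h), if_pos (by simpa using h), List.map_cons, ih]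
    · rw [if_neg (by simpa using h), if_neg (by simpa using h), ih]

lemma pv_neg_one_lt (x : Int) : (-1 < x) = (0 ≤ x) := propext (by omega)

-- ===== VERDICT (by name: the statement is the Claim_ definition above) =====
theorem get_adjacent_seats_spec : Claim_equal_get_adjacent_seats := by
  intro row column max_row max_column _
  unfold Spec_get_adjacent_seats
  unfold get_adjacent_seats get_adjacent_seats_alt
  rw [pv_clamp3 row max_row, pv_clamp3 column max_column]
  -- B side: inner loop = append of filtered mapped column list
  rw [show (fun (acc : List (Int × Int)) (r : Int) =>
        List.foldl (fun acc2 c => if (r, c) ≠ (row, column) then acc2 ++ [(r, c)] else acc2) acc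
          ([column - 1, column, column + 1].filter (fun x => decide (0 ≤ x ∧ x < max_column))))
      = fun acc r => acc ++
          ((([column - 1, column, column + 1].filter (fun x => decide (0 ≤ x ∧ x < max_column))).filter
            (fun c => decide ((r, c) ≠ (row, column)))).map (fun c => (r, c))) from by
    funext acc r
    exact PySem.List.foldl_append_ite (fun c => (r, c) ≠ (row, column)) (fun c => (r, c)) _ _]
  rw [PySem.List.foldl_append_eq_flatMap]
  -- A side: loop = filter-map over the offsets
  rw [show (fun (adjacent_seats : List (Int × Int)) (adja : Int × Int) =>
        let nrc := pvAddTuple adja (row, column)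
        if -1 < nrc.1 ∧ nrc.1 < max_row ∧ -1 < nrc.2 ∧ nrc.2 < max_column
        then adjacent_seats ++ [(nrc.1, nrc.2)]
        else adjacent_seats)
      = fun acc adja => if -1 < (pvAddTuple adja (row, column)).1 ∧ (pvAddTuple adja (row, column)).1 < max_row ∧
            -1 < (pvAddTuple adja (row, column)).2 ∧ (pvAddTuple adja (row, column)).2 < max_column
          then acc ++ [((pvAddTuple adja (row, column)).1, (pvAddTuple adja (row, column)).2)] else acc from rfl]
  rw [PySem.List.foldl_append_ite
    (fun adja => -1 < (pvAddTuple adja (row, column)).1 ∧ (pvAddTuple adja (row, column)).1 < max_row ∧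
      -1 < (pvAddTuple adja (row, column)).2 ∧ (pvAddTuple adja (row, column)).2 < max_column)
    (fun adja => ((pvAddTuple adja (row, column)).1, (pvAddTuple adja (row, column)).2))]
  simp only [List.nil_append, pv_flatMap_filter, pvAddTuple, pv_neg_one_lt]
  rw [pv_A_filter]
  rw [show List.map (fun adja : Int × Int => (adja.1 + row, adja.2 + column))
        [((-1 : Int), (-1 : Int)), (-1, 0), (-1, 1), (0, -1), (0, 1), (1, -1), (1, 0), (1, 1)]
      = ([column - 1, column, column + 1].map (fun c => (row - 1, c)))
        ++ ([column - 1, column + 1].map (fun c => (row, c)))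
        ++ ([column - 1, column, column + 1].map (fun c => (row + 1, c))) from by
    simp [Prod.ext_iff]
    omega]
  rw [List.filter_append, List.filter_append]
  simp only [pv_row_block]
  -- B side: flatMap over the literal row list
  simp only [List.flatMap_cons, List.flatMap_nil, List.append_nil, decide_eq_true_eq]
  rw [pv_center_filter_ne row column (row - 1) _ (by omega),
      pv_center_filter_ne row column (row + 1) _ (by omega),
      pv_center_filter_eq row column max_column]
  rw [List.append_assoc]
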